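-- pv_equiv track=rewrite | github.com/hillel-i-python-pro-i-2023-06-23/practice18_kom2 | app/services/generate_world.py | generate_word_regularly
-- ===== SOURCE A (Python) =====
-- def generate_word_regularly(word_len, use_simbols, start, end):
--     for i in range(start, end):
--         indices = []
--         remaining = i
--         for _ in range(word_len):
--             indices.append(remaining % len(use_simbols))
--             remaining //= len(use_simbols)
--         word = "".join([use_simbols[idx] for idx in reversed(indices)])
--         yield word
-- ===== SOURCE B (Python) =====
-- # Odometer re-implementation: convert `start` once to a digit vector, then
-- # increment it with carry for each subsequent value instead of re-converting.
-- def _digits(i, n, k):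
--     # k least-significant base-n digits of i, least significant first
--     out = []
--     while k > 0:
--         out.append(i % n)
--         i //= n
--         k -= 1
--     return out
--
--
-- def _inc(digits, n):
--     # add 1 to an LSB-first digit vector, dropping carry off the top
--     j = 0
--     while j < len(digits):
--         if digits[j] + 1 < n:
--             digits[j] += 1
--             return digits
--         digits[j] = 0
--         j += 1
--     return digits
--
--
-- def _word(digits, use_simbols):
--     return "".join(use_simbols[d] for d in reversed(digits))
--
--
-- def generate_word_regularly(word_len, use_simbols, start, end):
--     n = len(use_simbols)
--     count = end - start
--     if count <= 0:
--         return
--     if word_len <= 0: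
--         for _ in range(count):
--             yield ""
--         return
--     digits = _digits(start, n, word_len)
--     yield _word(digits, use_simbols)
--     for _ in range(count - 1):
--         digits = _inc(digits, n)
--         yield _word(digits, use_simbols)
-- ===== Notes on version B (the rewrite author's own statement) =====
-- stated objective: alternative
-- what changed: Replaces the per-value mod/div base conversion inside the loop by an odometer: the digit vector of `start` is computed once and then incremented with carry for each following value.
import Mathlib
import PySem

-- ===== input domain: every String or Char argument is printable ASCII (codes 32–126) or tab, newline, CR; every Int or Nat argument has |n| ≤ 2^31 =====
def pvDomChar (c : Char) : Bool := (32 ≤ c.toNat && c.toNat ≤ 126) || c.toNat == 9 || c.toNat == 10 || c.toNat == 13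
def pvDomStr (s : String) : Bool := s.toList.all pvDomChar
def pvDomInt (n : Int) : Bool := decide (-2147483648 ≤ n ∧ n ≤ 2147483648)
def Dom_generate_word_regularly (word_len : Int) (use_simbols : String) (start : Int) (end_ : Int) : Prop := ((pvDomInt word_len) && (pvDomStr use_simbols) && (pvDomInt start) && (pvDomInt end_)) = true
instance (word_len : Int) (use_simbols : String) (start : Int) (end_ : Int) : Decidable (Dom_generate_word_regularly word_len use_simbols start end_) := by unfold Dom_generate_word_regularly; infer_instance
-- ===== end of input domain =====

-- B replaces A's per-value base conversion by an odometer (increment-with-carry) over a maintained digit vector; an alternative algorithm of the same cost.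


-- ===== PORT A =====
-- literal port of A: for each i in range(start, end), rebuild the digit list by repeated %, //
def generate_word_regularly (word_len : Int) (use_simbols : String) (start : Int) (end_ : Int) : List String :=
  (PySem.List.pyRange start end_ 1).map (fun i =>
    let st := (PySem.List.pyRange 0 word_len 1).foldl
      (fun (st : List Int × Int) _ =>
        (st.1 ++ [PySem.Int.mod st.2 (PySem.Str.len use_simbols)],
         PySem.Int.floordiv st.2 (PySem.Str.len use_simbols))) ([], i)
    -- "".join of the 1-char strings use_simbols[idx] = the string of those chars
    String.mk (st.1.reverse.map (fun idx => (PySem.Str.pyGet? use_simbols idx).getD ' ')))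

-- ===== PORT B =====
-- _digits: k least-significant base-n digits of i, least significant first
def pvDigits (n : Int) : Nat → Int → List Int
  | 0, _ => []
  | k+1, i => PySem.Int.mod i n :: pvDigits n k (PySem.Int.floordiv i n)

-- _inc: add 1 to an LSB-first digit vector, dropping carry off the top
def pvInc (n : Int) : List Int → List Int
  | [] => []
  | d :: rest => if d + 1 < n then (d + 1) :: rest else 0 :: pvInc n rest

-- _word
def pvWord (use_simbols : String) (ds : List Int) : String :=
  String.mk (ds.reverse.map (fun d => (PySem.Str.pyGet? use_simbols d).getD ' '))

-- the `for _ in range(count - 1)` loop: k more words, incrementing each time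
def pvGenFrom (use_simbols : String) (n : Int) : Nat → List Int → List String
  | 0, _ => []
  | k+1, ds =>
      let ds' := pvInc n ds
      pvWord use_simbols ds' :: pvGenFrom use_simbols n k ds'

def generate_word_regularly_alt (word_len : Int) (use_simbols : String) (start : Int) (end_ : Int) : List String :=
  let n := PySem.Str.len use_simbols
  let count := end_ - start
  if count ≤ 0 then []
  else if word_len ≤ 0 then List.replicate count.toNat ""
  else
    let ds := pvDigits n word_len.toNat start
    pvWord use_simbols ds :: pvGenFrom use_simbols n (count - 1).toNat ds

-- ===== PRECONDITION & SPEC =====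
-- Pre_ excludes exactly the inputs where A raises ZeroDivisionError: empty symbol
-- string with a positive word length and a nonempty range (B raises there too).
def Pre_generate_word_regularly (word_len : Int) (use_simbols : String) (start : Int) (end_ : Int) : Prop :=
  ¬ (use_simbols = "" ∧ 1 ≤ word_len ∧ start < end_)
instance (word_len : Int) (use_simbols : String) (start : Int) (end_ : Int) : Decidable (Pre_generate_word_regularly word_len use_simbols start end_) := by unfold Pre_generate_word_regularly; infer_instance

def pvWitness_generate_word_regularly : Int × String × Int × Int := (2, "ab", -1, 6)

def Spec_generate_word_regularly (word_len : Int) (use_simbols : String) (start : Int) (end_ : Int) (out : List String) : Prop := out = generate_word_regularly_alt word_len use_simbols start end_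
instance (word_len : Int) (use_simbols : String) (start : Int) (end_ : Int) (out : List String) : Decidable (Spec_generate_word_regularly word_len use_simbols start end_ out) := by unfold Spec_generate_word_regularly; infer_instance

-- ===== CLAIM (what is proved, stated in full; the proofs are below) =====
def Claim_equal_generate_word_regularly : Prop := ∀ (word_len : Int) (use_simbols : String) (start : Int) (end_ : Int), Dom_generate_word_regularly word_len use_simbols start end_ → Pre_generate_word_regularly word_len use_simbols start end_ → Spec_generate_word_regularly word_len use_simbols start end_ (generate_word_regularly word_len use_simbols start end_)

-- ===== LEMMAS AND PROOFS =====

-- division facts for a positive base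
theorem pv_div_mod_succ (n i : Int) (hn : 0 < n) :
    (PySem.Int.mod (i + 1) n = if PySem.Int.mod i n + 1 < n then PySem.Int.mod i n + 1 else 0) ∧
    (PySem.Int.floordiv (i + 1) n = if PySem.Int.mod i n + 1 < n then PySem.Int.floordiv i n else PySem.Int.floordiv i n + 1) := by
  simp only [PySem.Int.mod_eq_emod_of_pos hn, PySem.Int.floordiv_eq_ediv_of_pos hn]
  have h0 : 0 ≤ i % n := Int.emod_nonneg i (by omega)
  have h1 : i % n < n := Int.emod_lt_of_pos i hn
  have heq : i = n * (i / n) + i % n := (Int.ediv_add_emod i n).symm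
  by_cases hlt : i % n + 1 < n
  · have := (Int.ediv_emod_unique (a := i + 1) (b := n) (q := i / n) (r := i % n + 1) hn).2
      ⟨by linarith, by linarith, hlt⟩
    simp [hlt, this.1, this.2]
  · have hr : i % n + 1 = n := le_antisymm (Int.add_one_le_iff.mpr h1) (not_lt.mp hlt)
    have hexp : n * (i / n + 1) = n * (i / n) + n := by ring
    have := (Int.ediv_emod_unique (a := i + 1) (b := n) (q := i / n + 1) (r := 0) hn).2
      ⟨by linarith, le_refl 0, hn⟩
    simp [hlt, this.1, this.2]

theorem pvInc_digits (n : Int) (hn : 0 < n) : ∀ (k : Nat) (i : Int),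
    pvInc n (pvDigits n k i) = pvDigits n k (i + 1) := by
  intro k
  induction k with
  | zero => intro i; simp [pvDigits, pvInc]
  | succ k ih =>
    intro i
    obtain ⟨hm, hd⟩ := pv_div_mod_succ n i hn
    by_cases hlt : PySem.Int.mod i n + 1 < n
    · simp [pvDigits, pvInc, hlt, hm, hd]
    · simp [pvDigits, pvInc, hlt, hm, hd, ih]

-- A's inner fold builds exactly pvDigits (appended to the accumulator)
theorem pvFold_digits (n : Int) : ∀ (l : List Int) (acc : List Int) (i : Int),
    (l.foldl (fun (st : List Int × Int) _ =>
        (st.1 ++ [PySem.Int.mod st.2 n], PySem.Int.floordiv st.2 n)) (acc, i)).1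
      = acc ++ pvDigits n l.length i := by
  intro l
  induction l with
  | nil => intro acc i; simp [pvDigits]
  | cons x xs ih => intro acc i; simp [List.foldl, ih, pvDigits]

-- the fold over range(word_len), with the accumulator theorem specialised
theorem pvFold_range (n word_len i : Int) :
    ((PySem.List.pyRange 0 word_len 1).foldl (fun (st : List Int × Int) _ =>
        (st.1 ++ [PySem.Int.mod st.2 n], PySem.Int.floordiv st.2 n)) ([], i)).1
      = pvDigits n word_len.toNat i := by
  have hlen : (PySem.List.pyRange 0 word_len 1).length = word_len.toNat := by
    rw [PySem.List.length_pyRange_one]; omega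
  have := pvFold_digits n (PySem.List.pyRange 0 word_len 1) [] i
  rw [hlen, List.nil_append] at this
  exact this

theorem pvGenFrom_eq (use_simbols : String) (L : Nat) (hn : 0 < PySem.Str.len use_simbols) :
    ∀ (k : Nat) (i : Int),
    pvGenFrom use_simbols (PySem.Str.len use_simbols) k (pvDigits (PySem.Str.len use_simbols) L i)
      = (PySem.List.pyRange (i + 1) (i + 1 + k) 1).map
          (fun j => pvWord use_simbols (pvDigits (PySem.Str.len use_simbols) L j)) := by
  intro k
  induction k with
  | zero => intro i; simp [pvGenFrom, PySem.List.pyRange_one_eq_nil]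
  | succ k ih =>
    intro i
    rw [show ((i + 1 + ((k + 1 : Nat) : Int)) : Int) = (i + 1) + 1 + k by push_cast; ring,
        PySem.List.pyRange_one_cons (by omega)]
    simp only [pvGenFrom, pvInc_digits _ hn L i, List.map_cons]
    exact congrArg _ (ih (i + 1))

theorem pv_len_pos (s : String) (h : s ≠ "") : 0 < PySem.Str.len s := by
  rw [PySem.Str.len_eq]
  have hne : s.toList ≠ [] := by simp [String.toList_eq_nil_iff, h]
  have : 0 < s.toList.length := List.length_pos_iff.mpr hne
  omega

-- ===== VERDICT (by name: the statement is the Claim_ definition above) =====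
theorem generate_word_regularly_spec : Claim_equal_generate_word_regularly := by
  intro word_len use_simbols start end_ _ hpre
  unfold Spec_generate_word_regularly generate_word_regularly generate_word_regularly_alt
  have hmap : (PySem.List.pyRange start end_ 1).map (fun i =>
      let st := (PySem.List.pyRange 0 word_len 1).foldl
        (fun (st : List Int × Int) _ =>
          (st.1 ++ [PySem.Int.mod st.2 (PySem.Str.len use_simbols)],
           PySem.Int.floordiv st.2 (PySem.Str.len use_simbols))) ([], i)
      String.mk (st.1.reverse.map (fun idx => (PySem.Str.pyGet? use_simbols idx).getD ' ')))
      = (PySem.List.pyRange start end_ 1).map (fun i =>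
          pvWord use_simbols (pvDigits (PySem.Str.len use_simbols) word_len.toNat i)) := by
    apply List.map_congr_left
    intro i _
    show String.mk _ = _
    rw [pvFold_range (PySem.Str.len use_simbols) word_len i]
    rfl
  rw [hmap]
  by_cases hc : end_ - start ≤ 0
  · rw [if_pos hc, PySem.List.pyRange_one_eq_nil (by omega), List.map_nil]
  · rw [if_neg hc]
    by_cases hw : word_len ≤ 0
    · rw [if_pos hw]
      have hL : word_len.toNat = 0 := by omega
      rw [hL]
      calc (PySem.List.pyRange start end_ 1).map
            (fun i => pvWord use_simbols (pvDigits (PySem.Str.len use_simbols) 0 i))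
          = (PySem.List.pyRange start end_ 1).map (fun _ => ("" : String)) := by
            apply List.map_congr_left; intro i _; rfl
        _ = List.replicate (end_ - start).toNat "" := by
            rw [List.map_const', PySem.List.length_pyRange_one]
    · rw [if_neg hw]
      have hs : use_simbols ≠ "" := fun hcon => hpre ⟨hcon, by omega, by omega⟩
      have hn := pv_len_pos use_simbols hs
      rw [PySem.List.pyRange_one_cons (by omega), List.map_cons]
      congr 1
      have hend : start + 1 + ((end_ - start - 1).toNat : Int) = end_ := by omega
      have := pvGenFrom_eq use_simbols word_len.toNat hn (end_ - start - 1).toNat start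
      rw [hend] at this
      exact this.symm
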